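-- pv_equiv track=rewrite | github.com/fallkon/HackBulgaria | week_0/member_of_nth_fib_lists/solution.py | member_of_nth_fib_lists
-- ===== SOURCE A (Python) =====
-- def nth_fib_lists(listA, listB, n):
-- 	if n == 1:
-- 		return listA
-- 	elif n == 2:
-- 		return listB
-- 	else :
-- 		return nth_fib_lists(listB, listA + listB, n - 1)
--
-- def list_to_number(digits):
-- 	count = 0
-- 	for item in digits:
-- 		count = count * 10 + item
-- 	return count
--
-- def count_substrings(haystack, needle):
-- 	return haystack.count(needle)#eta funkcia vozvra6iaet 4iso, skoliko ra vstre4aetsia substrin v stringe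
--
-- def member_of_nth_fib_lists(listA, listB, needle):
-- 	n = 1
-- 	while n < 10:
-- 		nth = nth_fib_lists(listA, listB, n)
-- 		string = str(list_to_number(nth))
-- 		if count_substrings(str(list_to_number(needle)), string):
-- 			return True
-- 		n += 1
-- 	return False
-- ===== SOURCE B (Python) =====
-- def member_of_nth_fib_lists(listA, listB, needle):
--     num = 0
--     for d in needle:
--         num = num * 10 + d
--     needle_str = str(num)
--     a, b = listA, listB
--     for _ in range(9):
--         num = 0
--         for d in a:
--             num = num * 10 + d
--         if str(num) in needle_str:
--             return True
--         a, b = b, a + b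
--     return False
-- ===== Notes on version B (the rewrite author's own statement) =====
-- stated objective: simpler
-- what changed: Replaces the recursive nth_fib_lists helper (which rebuilds each of the 9 Fibonacci-of-lists terms from scratch) and the count-based truthiness test with a single forward pass carrying two running lists and a plain substring test, converting the needle to a string once.
import Mathlib
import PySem

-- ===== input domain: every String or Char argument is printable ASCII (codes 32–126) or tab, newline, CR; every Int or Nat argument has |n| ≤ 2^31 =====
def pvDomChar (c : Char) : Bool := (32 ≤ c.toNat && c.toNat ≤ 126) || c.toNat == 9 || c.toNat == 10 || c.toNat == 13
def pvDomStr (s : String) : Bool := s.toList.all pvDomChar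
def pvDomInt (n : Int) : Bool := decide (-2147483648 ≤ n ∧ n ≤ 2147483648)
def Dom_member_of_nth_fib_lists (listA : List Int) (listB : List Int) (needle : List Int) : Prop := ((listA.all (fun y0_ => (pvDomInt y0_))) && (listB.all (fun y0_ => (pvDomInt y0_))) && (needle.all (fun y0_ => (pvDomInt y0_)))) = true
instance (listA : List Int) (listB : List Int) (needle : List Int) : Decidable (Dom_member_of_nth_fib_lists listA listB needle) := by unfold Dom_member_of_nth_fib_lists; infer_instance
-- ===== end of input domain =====

-- B replaces the recursive nth_fib_lists helper (rebuilding each term from scratch)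
-- by one forward pass carrying two running lists, converting the needle once; objective: simpler.

-- ===== PORT A =====
-- nth_fib_lists(listA, listB, n); A only calls it with n = 1..9 (the n = 0 case is unreachable there)
def pvNthFibLists (listA : List Int) (listB : List Int) (n : Nat) : List Int :=
  match n with
  | 0 => []
  | 1 => listA
  | 2 => listB
  | Nat.succ m => pvNthFibLists listB (listA ++ listB) m

-- list_to_number(digits)
def pvListToNumberA (digits : List Int) : Int :=
  digits.foldl (fun count item => count * 10 + item) 0

-- the while loop of member_of_nth_fib_lists, driven by n (count_substrings inlined: haystack.count(needle))
def pvLoopA (listA : List Int) (listB : List Int) (needle : List Int) (n : Nat) : Bool :=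
  if _h : n < 10 then
    let nth := pvNthFibLists listA listB n
    let string := PySem.Int.toStr (pvListToNumberA nth)
    if PySem.Str.count (PySem.Int.toStr (pvListToNumberA needle)) string ≠ 0 then true
    else pvLoopA listA listB needle (n + 1)
  else false
termination_by 10 - n

def member_of_nth_fib_lists (listA : List Int) (listB : List Int) (needle : List Int) : Bool :=
  pvLoopA listA listB needle 1

-- ===== PORT B =====
-- num accumulated by the inner digit loop of Source B
def pvNumB (digits : List Int) : Int :=
  digits.foldl (fun num d => num * 10 + d) 0

-- the 'for _ in range(9)' loop of Source B, carrying the running pair (a, b)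
def pvLoopB (a : List Int) (b : List Int) (needleStr : String) (k : Nat) : Bool :=
  match k with
  | 0 => false
  | Nat.succ m =>
    if PySem.Str.isIn (PySem.Int.toStr (pvNumB a)) needleStr then true
    else pvLoopB b (a ++ b) needleStr m

def member_of_nth_fib_lists_alt (listA : List Int) (listB : List Int) (needle : List Int) : Bool :=
  pvLoopB listA listB (PySem.Int.toStr (pvNumB needle)) 9

-- ===== PRECONDITION & SPEC =====
def Spec_member_of_nth_fib_lists (listA : List Int) (listB : List Int) (needle : List Int) (out : Bool) : Prop := out = member_of_nth_fib_lists_alt listA listB needle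
instance (listA : List Int) (listB : List Int) (needle : List Int) (out : Bool) : Decidable (Spec_member_of_nth_fib_lists listA listB needle out) := by unfold Spec_member_of_nth_fib_lists; infer_instance

-- ===== CLAIM (what is proved, stated in full; the proofs are below) =====
def Claim_equal_member_of_nth_fib_lists : Prop := ∀ (listA : List Int) (listB : List Int) (needle : List Int), Dom_member_of_nth_fib_lists listA listB needle → Spec_member_of_nth_fib_lists listA listB needle (member_of_nth_fib_lists listA listB needle)

-- ===== LEMMAS AND PROOFS =====

-- count.go never returns less than its accumulator
theorem pvCountGo_le (sub : List Char) : ∀ (fuel : Nat) (l : List Char) (acc : Nat),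
    acc ≤ PySem.Chars.count.go sub fuel l acc := by
  intro fuel
  induction fuel with
  | zero => intro l acc; simp [PySem.Chars.count.go]
  | succ m ih =>
    intro l acc
    cases l with
    | nil => simp [PySem.Chars.count.go]
    | cons h t =>
      rw [PySem.Chars.count.go]
      split
      · exact le_trans (Nat.le_succ acc) (ih _ _)
      · exact ih _ _

-- for nonempty sub, count.go exceeds its accumulator exactly when sub occurs in l
theorem pvCountGo_eq_iff (sub : List Char) (hsub : sub ≠ []) : ∀ (fuel : Nat) (l : List Char) (acc : Nat),
    l.length ≤ fuel → (PySem.Chars.count.go sub fuel l acc = acc ↔ ¬ sub <:+: l) := by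
  intro fuel
  induction fuel with
  | zero =>
    intro l acc hl
    have hnil : l = [] := List.length_eq_zero_iff.mp (Nat.le_zero.mp hl)
    subst hnil
    simp [PySem.Chars.count.go, List.infix_nil, hsub]
  | succ m ih =>
    intro l acc hl
    cases l with
    | nil => simp [PySem.Chars.count.go, List.infix_nil, hsub]
    | cons h t =>
      rw [PySem.Chars.count.go]
      split
      · rename_i hpre
        have hinf : sub <:+: (h :: t) := (List.isPrefixOf_iff_prefix.mp hpre).isInfix
        have hle := pvCountGo_le sub m (List.drop sub.length (h :: t)) (acc + 1)
        constructor
        · intro he; omega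
        · intro hn; exact absurd hinf hn
      · rename_i hpre
        have hlen : t.length ≤ m := by simpa using hl
        rw [ih t acc hlen]
        constructor
        · intro hnt hinf
          rcases List.infix_cons_iff.mp hinf with hpf | hsf
          · exact hpre (by simpa [List.isPrefixOf_iff_prefix] using hpf)
          · exact hnt hsf
        · intro hn
          exact fun hsf => hn (List.infix_cons hsf)

-- count ≠ 0 exactly when sub is a substring (Python truthiness of haystack.count(needle) vs 'in')
theorem pvCount_ne_zero_iff (h n : String) :
    (PySem.Str.count h n ≠ 0) ↔ PySem.Str.isIn n h = true := by
  by_cases he : n.toList = []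
  · simp [PySem.Str.count, PySem.Str.isIn, PySem.Chars.count, he, PySem.Chars.isIn_nil]
  · simp only [PySem.Str.count, PySem.Str.isIn]
    rw [PySem.Chars.count]
    simp only [List.isEmpty_iff, he, if_false]
    rw [Ne, pvCountGo_eq_iff n.toList he h.toList.length h.toList 0 le_rfl, not_not]
    exact (PySem.Chars.isIn_iff_infix _ _).symm

-- one guarded step of A's while loop
theorem pvStepA (a b nd : List Int) (n : Nat) (h : n < 10) :
    pvLoopA a b nd n =
      if PySem.Str.count (PySem.Int.toStr (pvListToNumberA nd))
           (PySem.Int.toStr (pvListToNumberA (pvNthFibLists a b n))) ≠ 0 then true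
      else pvLoopA a b nd (n + 1) := by
  rw [pvLoopA, dif_pos h]

theorem pvEndA (a b nd : List Int) : pvLoopA a b nd 10 = false := by
  rw [pvLoopA, dif_neg (by norm_num)]

-- A's truthiness test on count agrees with B's 'in' test
theorem pvCondEq (H s : String) (x y : Bool) :
    (if PySem.Str.count H s ≠ 0 then x else y) = (if PySem.Str.isIn s H = true then x else y) := by
  split_ifs with h1 h2
  · rfl
  · exact absurd ((pvCount_ne_zero_iff H s).mp h1) h2
  · rename_i h2; exact absurd ((pvCount_ne_zero_iff H s).mpr h2) h1
  · rfl

-- ===== VERDICT (by name: the statement is the Claim_ definition above) =====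
theorem member_of_nth_fib_lists_spec : Claim_equal_member_of_nth_fib_lists := by
  intro a b nd _
  unfold Spec_member_of_nth_fib_lists
  show pvLoopA a b nd 1 = pvLoopB a b (PySem.Int.toStr (pvNumB nd)) 9
  rw [pvStepA a b nd 1 (by norm_num), pvStepA a b nd 2 (by norm_num),
    pvStepA a b nd 3 (by norm_num), pvStepA a b nd 4 (by norm_num),
    pvStepA a b nd 5 (by norm_num), pvStepA a b nd 6 (by norm_num),
    pvStepA a b nd 7 (by norm_num), pvStepA a b nd 8 (by norm_num),
    pvStepA a b nd 9 (by norm_num), pvEndA]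
  simp only [pvCondEq]
  rfl
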